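-- pv_equiv track=rewrite | github.com/RightHennessy/Eat-Algorithm | 02. 탐욕적 기법 (Greedy)/15748.RestStops.py | solution
-- ===== SOURCE A (Python) =====
-- def solution(rf, rb, stops):
--     stops.sort(key=lambda x:-x[1])
--     answer = 0
--     prev_stop = 0
--     time = 0
--     r = rf - rb
--     for t, c in stops:
--         if t < prev_stop:
--             continue
--         prev_stop = t
--         answer += (t - time)*r*c
--         time = t
--     return answer
-- ===== SOURCE B (Python) =====
-- def solution(rf, rb, stops):
--     # No sort: repeatedly jump to the farthest stop among those with the best
--     # (maximum) cow count ahead of the current time, accumulating the reward.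
--     r = rf - rb
--     time = 0
--     ans = 0
--     pend = list(stops)
--     while True:
--         pend = [s for s in pend if s[0] > time]
--         if not pend:
--             return ans
--         c_star = max(c for _, c in pend)
--         t_star = max(t for t, c in pend if c == c_star)
--         ans += (t_star - time) * r * c_star
--         time = t_star
-- ===== Notes on version B (the rewrite author's own statement) =====
-- stated objective: alternative
-- what changed: A sorts the stops by descending cow count and does one greedy sweep; B never sorts: it repeatedly filters to the stops strictly ahead of the current position and jumps to the farthest stop among those with the maximal cow count, accumulating the reward per jump.
import Mathlib
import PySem

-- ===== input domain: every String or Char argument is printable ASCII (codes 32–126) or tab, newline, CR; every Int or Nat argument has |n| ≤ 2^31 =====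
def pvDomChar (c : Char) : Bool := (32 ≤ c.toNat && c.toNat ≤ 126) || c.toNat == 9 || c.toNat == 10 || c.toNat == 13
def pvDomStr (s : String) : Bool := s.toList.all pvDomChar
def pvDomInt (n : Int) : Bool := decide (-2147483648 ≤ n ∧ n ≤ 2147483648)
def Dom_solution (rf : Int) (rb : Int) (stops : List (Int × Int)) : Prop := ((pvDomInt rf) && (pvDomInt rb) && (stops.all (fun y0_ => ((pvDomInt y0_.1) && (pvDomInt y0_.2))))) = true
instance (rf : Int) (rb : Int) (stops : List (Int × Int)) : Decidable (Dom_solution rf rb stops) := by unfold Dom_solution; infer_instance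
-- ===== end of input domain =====

-- B replaces A's sort-by-cow-count greedy with a sort-free repeated "jump to the farthest
-- best stop ahead" loop (objective: alternative). Return values agree; only the RETURN value
-- is claimed (Python A additionally sorts its `stops` argument in place, B does not).

-- ===== PORT A =====
-- A: stable sort by descending cow count, then one greedy pass with state (answer, prev_stop, time).
def solution (rf : Int) (rb : Int) (stops : List (Int × Int)) : Int :=
  let sortedStops := PySem.List.sorted stops (fun x => -x.2) false
  let r := rf - rb
  (sortedStops.foldl
    (fun (st : Int × Int × Int) tc =>
      if tc.1 < st.2.1 then st
      else (st.1 + (tc.1 - st.2.2) * r * tc.2, tc.1, tc.1))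
    (0, 0, 0)).1

-- ===== PORT B =====
-- max of a nonempty list of ints (Python's max(); the [] default 0 is never reached on the guarded paths)
def maxInt (xs : List Int) : Int :=
  match xs with
  | [] => 0
  | x :: t => t.foldl max x

-- c_star = max(c for _, c in pend)
def cOf (pend : List (Int × Int)) : Int := maxInt (pend.map Prod.snd)
-- t_star = max(t for t, c in pend if c == c_star)
def tOf (pend : List (Int × Int)) : Int :=
  maxInt ((pend.filter fun s => decide (s.2 = cOf pend)).map Prod.fst)

theorem maxInt_mem (xs : List Int) (h : xs ≠ []) : maxInt xs ∈ xs := by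
  match xs with
  | x :: t =>
    rcases PySem.List.foldl_max_mem t x with h1 | h1
    · simp [maxInt, h1]
    · simp [maxInt, h1]

-- tOf is attained by a best-count stop
theorem tOf_mem (P : List (Int × Int)) (h : P ≠ []) :
    ∃ s ∈ P, s.2 = cOf P ∧ s.1 = tOf P := by
  have hsnd : cOf P ∈ P.map Prod.snd := maxInt_mem _ (by simpa using h)
  obtain ⟨s, hsP, hs2⟩ := List.mem_map.mp hsnd
  have hne : ((P.filter fun s => decide (s.2 = cOf P)).map Prod.fst) ≠ [] := by
    simp only [ne_eq, List.map_eq_nil_iff, List.filter_eq_nil_iff, not_forall]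
    exact ⟨s, hsP, by simp [hs2]⟩
  obtain ⟨x, hxf, hx1⟩ := List.mem_map.mp (maxInt_mem _ hne)
  have hx := List.mem_filter.mp hxf
  exact ⟨x, hx.1, by simpa using hx.2, hx1⟩

-- the loop-variant inequality cited by solnGo's decreasing_by
theorem tOf_filter_lt (P : List (Int × Int)) (h : P ≠ []) :
    ((P.filter fun s => decide (tOf P < s.1)).length < P.length) := by
  obtain ⟨s, hsP, _, hs1⟩ := tOf_mem P h
  exact List.length_filter_lt_length_iff_exists.mpr ⟨s, hsP, by simp [hs1]⟩

-- B: loop of Source B — drop the stops not strictly ahead, jump to the farthest stop among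
-- those of maximal cow count, add its reward, repeat.
def solnGo (r time ans : Int) (pend : List (Int × Int)) : Int :=
  let pend' := pend.filter fun s => decide (time < s.1)
  if h : pend' = [] then ans
  else solnGo r (tOf pend') (ans + (tOf pend' - time) * r * cOf pend') pend'
termination_by (pend.filter fun s => decide (time < s.1)).length
decreasing_by
  have key : (List.filter (fun (x : {a // a ∈ pend}) => decide (time < x.val.1)) pend.attach).unattach
      = pend.filter (fun s => decide (time < s.1)) := by
    rw [List.unattach_filter (g := fun s => decide (time < s.1)) (hf := fun x h => rfl), List.unattach_attach]
  simp only [key]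
  exact tOf_filter_lt _ (fun he => h (key.trans he))

def solution_alt (rf : Int) (rb : Int) (stops : List (Int × Int)) : Int :=
  solnGo (rf - rb) 0 0 stops

-- ===== PRECONDITION & SPEC =====
def Spec_solution (rf : Int) (rb : Int) (stops : List (Int × Int)) (out : Int) : Prop := out = solution_alt rf rb stops
instance (rf : Int) (rb : Int) (stops : List (Int × Int)) (out : Int) : Decidable (Spec_solution rf rb stops out) := by unfold Spec_solution; infer_instance

-- ===== CLAIM (what is proved, stated in full; the proofs are below) =====
def Claim_equal_solution : Prop := ∀ (rf : Int) (rb : Int) (stops : List (Int × Int)), Dom_solution rf rb stops → Spec_solution rf rb stops (solution rf rb stops)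

-- ===== LEMMAS AND PROOFS =====

theorem le_maxInt (xs : List Int) (a : Int) (ha : a ∈ xs) : a ≤ maxInt xs := by
  match xs with
  | x :: t =>
    have h := PySem.List.le_foldl_max t x
    rcases List.mem_cons.mp ha with h1 | h1
    · simpa [maxInt, h1] using h.1
    · exact h.2 a h1

-- first projections of the best-count stops are bounded by tOf
theorem le_tOf (P : List (Int × Int)) (s : Int × Int) (hs : s ∈ P) (h2 : s.2 = cOf P) :
    s.1 ≤ tOf P := by
  apply le_maxInt
  exact List.mem_map.mpr ⟨s, List.mem_filter.mpr ⟨hs, by simp [h2]⟩, rfl⟩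

theorem maxInt_eq_of_mem_of_le (xs : List Int) (c : Int) (hm : c ∈ xs) (hle : ∀ a ∈ xs, a ≤ c) :
    maxInt xs = c := by
  have hne : xs ≠ [] := by intro h; rw [h] at hm; simp at hm
  exact le_antisymm (hle _ (maxInt_mem xs hne)) (le_maxInt xs c hm)

theorem maxInt_perm (xs ys : List Int) (hp : xs.Perm ys) (h : xs ≠ []) : maxInt xs = maxInt ys := by
  have hy : ys ≠ [] := by intro hc; subst hc; exact h hp.eq_nil
  exact le_antisymm (le_maxInt ys _ (hp.mem_iff.mp (maxInt_mem xs h)))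
    (le_maxInt xs _ (hp.mem_iff.mpr (maxInt_mem ys hy)))

theorem cOf_eq (P : List (Int × Int)) (c : Int) (hm : ∃ s ∈ P, s.2 = c) (hle : ∀ s ∈ P, s.2 ≤ c) :
    cOf P = c := by
  obtain ⟨s, hs, hs2⟩ := hm
  refine maxInt_eq_of_mem_of_le _ _ (List.mem_map.mpr ⟨s, hs, hs2⟩) ?_
  intro a ha
  obtain ⟨u, hu, hu2⟩ := List.mem_map.mp ha
  exact hu2 ▸ hle u hu

theorem tOf_eq (P : List (Int × Int)) (t : Int)
    (hm : ∃ s ∈ P, s.2 = cOf P ∧ s.1 = t) (hle : ∀ s ∈ P, s.2 = cOf P → s.1 ≤ t) :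
    tOf P = t := by
  obtain ⟨s, hs, hs2, hs1⟩ := hm
  refine maxInt_eq_of_mem_of_le _ _
    (List.mem_map.mpr ⟨s, List.mem_filter.mpr ⟨hs, by simp [hs2]⟩, hs1⟩) ?_
  intro a ha
  obtain ⟨u, hu, hu1⟩ := List.mem_map.mp ha
  have hu' := List.mem_filter.mp hu
  exact hu1 ▸ hle u hu'.1 (by simpa using hu'.2)

-- solnGo only looks at pend through its filtered form
theorem solnGo_congr (r time ans : Int) (P Q : List (Int × Int))
    (h : (P.filter fun s => decide (time < s.1)) = (Q.filter fun s => decide (time < s.1))) :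
    solnGo r time ans P = solnGo r time ans Q := by
  conv_lhs => rw [solnGo]
  conv_rhs => rw [solnGo]
  rw [h]

theorem filter_filter_lt (L : List (Int × Int)) (a b : Int) (hab : a ≤ b) :
    ((L.filter fun s => decide (a < s.1)).filter fun s => decide (b < s.1))
      = L.filter fun s => decide (b < s.1) := by
  rw [List.filter_filter]
  apply List.filter_congr
  intro x _
  by_cases hb : b < x.1
  · simp only [hb, decide_true]
    simp [show a < x.1 by omega]
  · simp [hb]

-- the peel step: a stop strictly ahead of `time` whose cow count dominates the rest of the
-- list is (value-wise) the first jump of B's loop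
theorem solnGo_peel (r time ans t c : Int) (L : List (Int × Int))
    (ht : time < t) (hc : ∀ b ∈ L, b.2 ≤ c) :
    solnGo r time ans ((t, c) :: L) = solnGo r t (ans + (t - time) * r * c) L := by
  have hcons : ((t, c) :: L).filter (fun s => decide (time < s.1))
      = (t, c) :: L.filter (fun s => decide (time < s.1)) := by simp [ht]
  set L' := L.filter fun s => decide (time < s.1) with hL'
  have hcL' : ∀ b ∈ L', b.2 ≤ c := fun b hb => hc b (List.mem_of_mem_filter hb)
  have hcstar : cOf ((t, c) :: L') = c :=
    cOf_eq _ c ⟨(t, c), by simp⟩ (by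
      intro s hs
      rcases List.mem_cons.mp hs with h1 | h1
      · simp [h1]
      · exact hcL' s h1)
  set ts := tOf ((t, c) :: L') with hts
  have ht_ts : t ≤ ts := le_tOf _ (t, c) (by simp) (by simp [hcstar])
  have hstep : solnGo r time ans ((t, c) :: L)
      = solnGo r ts (ans + (ts - time) * r * c) ((t, c) :: L') := by
    conv_lhs => rw [solnGo]
    simp only [hcons]
    rw [dif_neg (by simp), hcstar, ← hts]
  have hdrop : ∀ A : Int, solnGo r ts A ((t, c) :: L') = solnGo r ts A L := by
    intro A
    apply solnGo_congr
    have h1 : decide (ts < t) = false := by simp; omega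
    simp only [List.filter_cons, h1]
    rw [hL', filter_filter_lt L time ts (by omega)]
    simp
  rcases eq_or_lt_of_le ht_ts with hcase | hcase
  · rw [hstep, hdrop, ← hcase]
  · -- ts > t : B's first jump overshoots t; unfold the RHS once more
    obtain ⟨s, hsmem, hs2, hs1⟩ := tOf_mem ((t, c) :: L') (by simp)
    rw [hcstar] at hs2
    rw [← hts] at hs1
    have hsL : s ∈ L := by
      rcases List.mem_cons.mp hsmem with h1 | h1
      · exfalso; rw [h1] at hs1; simp at hs1; omega
      · exact List.mem_of_mem_filter h1
    have hP'' : s ∈ L.filter fun u => decide (t < u.1) := by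
      simp only [List.mem_filter]
      exact ⟨hsL, by simp [hs1]; omega⟩
    set P'' := L.filter fun u => decide (t < u.1) with hP''def
    have hP''ne : P'' ≠ [] := by intro hcon; rw [hcon] at hP''; simp at hP''
    have hc'' : cOf P'' = c :=
      cOf_eq _ c ⟨s, hP'', hs2⟩ (fun u hu => hc u (List.mem_of_mem_filter hu))
    have ht'' : tOf P'' = ts := by
      refine tOf_eq _ _ ⟨s, hP'', by rw [hc'']; exact hs2, hs1⟩ ?_
      intro u hu hu2
      have huL : u ∈ L := List.mem_of_mem_filter hu
      have hut : t < u.1 := by have := (List.mem_filter.mp hu).2; simpa using this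
      have huL' : u ∈ L' := by
        rw [hL']; exact List.mem_filter.mpr ⟨huL, by simp; omega⟩
      exact le_tOf ((t, c) :: L') u (List.mem_cons_of_mem _ huL') (by rw [hcstar, ← hc'']; exact hu2)
    have hrhs : solnGo r t (ans + (t - time) * r * c) L
        = solnGo r ts (ans + (t - time) * r * c + (ts - t) * r * c) P'' := by
      conv_lhs => rw [solnGo]
      rw [← hP''def, dif_neg hP''ne, hc'', ht'']
    rw [hstep, hdrop, hrhs]
    have hacc : ans + (t - time) * r * c + (ts - t) * r * c = ans + (ts - time) * r * c := by ring
    rw [hacc]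
    apply solnGo_congr
    rw [hP''def, filter_filter_lt L t ts (by omega)]

-- A's greedy pass over a list sorted by weakly descending cow count computes B's loop
theorem main_lemma (r : Int) (L : List (Int × Int))
    (hpw : L.Pairwise (fun a b => b.2 ≤ a.2)) :
    ∀ time ans,
      (L.foldl
        (fun (st : Int × Int × Int) tc =>
          if tc.1 < st.2.1 then st
          else (st.1 + (tc.1 - st.2.2) * r * tc.2, tc.1, tc.1))
        (ans, time, time)).1 = solnGo r time ans L := by
  induction L with
  | nil =>
    intro time ans
    rw [solnGo]
    simp
  | cons hd tl ih =>
    obtain ⟨hhd, htl⟩ := List.pairwise_cons.mp hpw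
    intro time ans
    obtain ⟨t, c⟩ := hd
    simp only [List.foldl_cons]
    by_cases h1 : t < time
    · rw [if_pos (by simpa using h1)]
      rw [ih htl time ans]
      apply solnGo_congr
      simp [show ¬ (time < t) by omega]
    · rw [if_neg (by simpa using h1)]
      rcases eq_or_lt_of_le (show time ≤ t by omega) with h2 | h2
      · -- t = time: selected, but contributes zero and leaves the state unchanged
        have : (ans + (t - time) * r * c, t, t) = (ans, time, time) := by
          rw [← h2]; simp
        rw [this, ih htl time ans]
        apply solnGo_congr
        simp [show ¬ (time < t) by omega]
      · rw [ih htl t (ans + (t - time) * r * c)]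
        exact (solnGo_peel r time ans t c tl h2 (fun b hb => hhd b hb)).symm

-- B's loop is insensitive to the order of the stops
theorem perm_lemma (r : Int) : ∀ (n : Nat) (time ans : Int) (L1 L2 : List (Int × Int)),
    (L1.filter fun s => decide (time < s.1)).length ≤ n → L1.Perm L2 →
    solnGo r time ans L1 = solnGo r time ans L2 := by
  intro n
  induction n with
  | zero =>
    intro time ans L1 L2 hlen hp
    have h1 : (L1.filter fun s => decide (time < s.1)) = [] := by
      rcases List.eq_nil_or_concat (L1.filter fun s => decide (time < s.1)) with h | ⟨_, _, h⟩
      · exact h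
      · rw [h] at hlen; simp at hlen
    have h2 : (L2.filter fun s => decide (time < s.1)) = [] :=
      List.Perm.eq_nil (h1 ▸ (hp.filter _)).symm
    conv_lhs => rw [solnGo]
    conv_rhs => rw [solnGo]
    rw [dif_pos h1, dif_pos h2]
  | succ n ihn =>
    intro time ans L1 L2 hlen hp
    set P1 := L1.filter fun s => decide (time < s.1) with hP1
    set P2 := L2.filter fun s => decide (time < s.1) with hP2
    have hperm : P1.Perm P2 := hp.filter _
    by_cases hni : P1 = []
    · have h2 : P2 = [] := List.Perm.eq_nil (hni ▸ hperm).symm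
      conv_lhs => rw [solnGo]
      conv_rhs => rw [solnGo]
      simp only [← hP1, ← hP2]
      rw [dif_pos hni, dif_pos h2]
    · have hn2 : P2 ≠ [] := by intro hc; exact hni (List.Perm.eq_nil (hc ▸ hperm))
      have hcOf : cOf P1 = cOf P2 :=
        maxInt_perm _ _ (hperm.map Prod.snd) (by simpa using hni)
      have htops : (P1.filter fun s => decide (s.2 = cOf P1)).Perm
          (P2.filter fun s => decide (s.2 = cOf P2)) := by
        rw [hcOf]; exact hperm.filter _
      have htopsne : (P1.filter fun s => decide (s.2 = cOf P1)) ≠ [] := by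
        have hsnd : cOf P1 ∈ P1.map Prod.snd := maxInt_mem _ (by simpa using hni)
        obtain ⟨s, hsP, hs2⟩ := List.mem_map.mp hsnd
        intro hcon
        have := List.filter_eq_nil_iff.mp hcon s hsP
        simp [hs2] at this
      have htOf : tOf P1 = tOf P2 :=
        maxInt_perm _ _ (htops.map Prod.fst) (by simpa using htopsne)
      conv_lhs => rw [solnGo]
      conv_rhs => rw [solnGo]
      simp only [← hP1, ← hP2]
      rw [dif_neg hni, dif_neg hn2, ← hcOf, ← htOf]
      apply ihn
      · have hlt := tOf_filter_lt P1 hni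
        have : P1.length ≤ n + 1 := hlen
        omega
      · exact hperm

-- ===== VERDICT (by name: the statement is the Claim_ definition above) =====
theorem solution_spec : Claim_equal_solution := by
  intro rf rb stops _
  unfold Spec_solution solution solution_alt
  have hpw : (PySem.List.sorted stops (fun x : Int × Int => -x.2) false).Pairwise
      (fun a b : Int × Int => b.2 ≤ a.2) := by
    have h := PySem.List.sorted_pairwise stops (fun x : Int × Int => -x.2)
    exact h.imp (fun h => by omega)
  rw [main_lemma (rf - rb) _ hpw 0 0]
  exact perm_lemma (rf - rb) _ 0 0 _ stops le_rfl (PySem.List.sorted_perm stops _ false)
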